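-- pv_equiv track=rewrite | github.com/diegopastrian/metaheuristicas | Tarea1/tarea1.py | es_factible
-- ===== SOURCE A (Python) =====
-- cobertura = [
--     [1, 1, 1, 1, 0, 0, 0, 0, 0, 0, 0, 0, 1, 0, 0],
--     [1, 1, 0, 1, 0, 0, 0, 0, 0, 0, 0, 1, 0, 0, 1],
--     [1, 0, 1, 1, 1, 1, 0, 0, 0, 0, 0, 0, 1, 0, 0],
--     [1, 1, 1, 1, 1, 0, 0, 0, 0, 0, 0, 1, 0, 0, 0],
--     [0, 0, 1, 1, 1, 1, 1, 1, 1, 0, 0, 1, 0, 0, 0],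
--     [0, 0, 1, 0, 1, 1, 0, 0, 1, 0, 0, 0, 0, 0, 0],
--     [0, 0, 0, 0, 1, 0, 1, 1, 0, 1, 1, 1, 0, 1, 1],
--     [0, 0, 0, 0, 1, 0, 1, 1, 1, 1, 0, 0, 0, 0, 0],
--     [0, 0, 0, 0, 1, 1, 0, 1, 1, 1, 1, 0, 0, 0, 0],
--     [0, 0, 0, 0, 0, 0, 1, 1, 1, 1, 1, 0, 0, 0, 0],
--     [0, 0, 0, 0, 0, 0, 1, 0, 1, 1, 1, 0, 0, 1, 0],
--     [0, 1, 0, 1, 1, 0, 1, 0, 0, 0, 0, 1, 0, 0, 1],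
--     [1, 0, 1, 0, 0, 0, 0, 0, 0, 0, 0, 0, 1, 0, 0],
--     [0, 0, 0, 0, 0, 0, 1, 0, 0, 0, 1, 0, 0, 1, 1],
--     [0, 1, 0, 0, 0, 0, 1, 0, 0, 0, 0, 1, 0, 1, 1]
-- ]
--
-- comunas = list(range(1, 16))
--
-- def es_factible(solucion):
--     """
--     Verifica que se satisface la demanda de cada comuna
--     """
--     for j in comunas:
--         cubierta = False
--         for i in comunas:
--             # Verifica si j está en la cobertura de algún i con x_i=1
--             if cobertura[i-1][j-1] == 1 and solucion.get(i, 0) == 1:  # Cobertura binaria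
--                 cubierta = True
--                 break
--         if not cubierta:
--             return False
--     return True
-- ===== SOURCE B (Python) =====
-- cobertura = [
--     [1, 1, 1, 1, 0, 0, 0, 0, 0, 0, 0, 0, 1, 0, 0],
--     [1, 1, 0, 1, 0, 0, 0, 0, 0, 0, 0, 1, 0, 0, 1],
--     [1, 0, 1, 1, 1, 1, 0, 0, 0, 0, 0, 0, 1, 0, 0],
--     [1, 1, 1, 1, 1, 0, 0, 0, 0, 0, 0, 1, 0, 0, 0],
--     [0, 0, 1, 1, 1, 1, 1, 1, 1, 0, 0, 1, 0, 0, 0],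
--     [0, 0, 1, 0, 1, 1, 0, 0, 1, 0, 0, 0, 0, 0, 0],
--     [0, 0, 0, 0, 1, 0, 1, 1, 0, 1, 1, 1, 0, 1, 1],
--     [0, 0, 0, 0, 1, 0, 1, 1, 1, 1, 0, 0, 0, 0, 0],
--     [0, 0, 0, 0, 1, 1, 0, 1, 1, 1, 1, 0, 0, 0, 0],
--     [0, 0, 0, 0, 0, 0, 1, 1, 1, 1, 1, 0, 0, 0, 0],
--     [0, 0, 0, 0, 0, 0, 1, 0, 1, 1, 1, 0, 0, 1, 0],
--     [0, 1, 0, 1, 1, 0, 1, 0, 0, 0, 0, 1, 0, 0, 1],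
--     [1, 0, 1, 0, 0, 0, 0, 0, 0, 0, 0, 0, 1, 0, 0],
--     [0, 0, 0, 0, 0, 0, 1, 0, 0, 0, 1, 0, 0, 1, 1],
--     [0, 1, 0, 0, 0, 0, 1, 0, 0, 0, 0, 1, 0, 1, 1]
-- ]
--
-- comunas = list(range(1, 16))
--
-- # Each facility's coverage row precomputed as a 15-bit mask (bit j-1 <-> comuna j).
-- _masks = [sum(1 << j for j in range(15) if cobertura[i][j] == 1) for i in range(15)]
--
-- _FULL = (1 << 15) - 1
--
--
-- def es_factible(solucion):
--     """Bitmask: OR together the masks of selected facilities; feasible iff all 15 bits set."""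
--     covered = 0
--     for i in range(1, 16):
--         if solucion.get(i, 0) == 1:
--             covered |= _masks[i - 1]
--     return covered == _FULL
-- ===== Notes on version B (the rewrite author's own statement) =====
-- stated objective: alternative
-- what changed: Replaces A's nested per-comuna/per-facility search with early break by a precomputed 15-bit coverage mask per facility: one pass ORs the masks of the selected facilities and feasibility is a single comparison of the accumulated mask against the full mask.
import Mathlib
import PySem

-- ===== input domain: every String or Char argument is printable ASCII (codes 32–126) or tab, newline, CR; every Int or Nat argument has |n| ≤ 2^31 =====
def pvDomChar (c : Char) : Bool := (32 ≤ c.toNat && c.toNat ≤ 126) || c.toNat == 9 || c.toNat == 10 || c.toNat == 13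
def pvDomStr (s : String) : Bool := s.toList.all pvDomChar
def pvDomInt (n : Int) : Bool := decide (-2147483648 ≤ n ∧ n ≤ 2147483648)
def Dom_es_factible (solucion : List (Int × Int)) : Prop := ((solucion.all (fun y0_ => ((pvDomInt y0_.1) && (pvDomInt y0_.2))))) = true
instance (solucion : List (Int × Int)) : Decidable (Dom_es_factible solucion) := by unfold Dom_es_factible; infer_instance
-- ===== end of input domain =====

-- B replaces A's nested search-with-break by a bitmask algorithm: each facility's coverage
-- row is a precomputed 15-bit mask, one pass ORs the masks of the selected facilities, and
-- feasibility is a single comparison with the full mask (objective: alternative).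

-- ===== PORT A =====
def cobertura : List (List Int) := [
  [1, 1, 1, 1, 0, 0, 0, 0, 0, 0, 0, 0, 1, 0, 0],
  [1, 1, 0, 1, 0, 0, 0, 0, 0, 0, 0, 1, 0, 0, 1],
  [1, 0, 1, 1, 1, 1, 0, 0, 0, 0, 0, 0, 1, 0, 0],
  [1, 1, 1, 1, 1, 0, 0, 0, 0, 0, 0, 1, 0, 0, 0],
  [0, 0, 1, 1, 1, 1, 1, 1, 1, 0, 0, 1, 0, 0, 0],
  [0, 0, 1, 0, 1, 1, 0, 0, 1, 0, 0, 0, 0, 0, 0],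
  [0, 0, 0, 0, 1, 0, 1, 1, 0, 1, 1, 1, 0, 1, 1],
  [0, 0, 0, 0, 1, 0, 1, 1, 1, 1, 0, 0, 0, 0, 0],
  [0, 0, 0, 0, 1, 1, 0, 1, 1, 1, 1, 0, 0, 0, 0],
  [0, 0, 0, 0, 0, 0, 1, 1, 1, 1, 1, 0, 0, 0, 0],
  [0, 0, 0, 0, 0, 0, 1, 0, 1, 1, 1, 0, 0, 1, 0],
  [0, 1, 0, 1, 1, 0, 1, 0, 0, 0, 0, 1, 0, 0, 1],
  [1, 0, 1, 0, 0, 0, 0, 0, 0, 0, 0, 0, 1, 0, 0],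
  [0, 0, 0, 0, 0, 0, 1, 0, 0, 0, 1, 0, 0, 1, 1],
  [0, 1, 0, 0, 0, 0, 1, 0, 0, 0, 0, 1, 0, 1, 1]]

def comunas : List Int := PySem.List.pyRange 1 16 1

-- cobertura[i-1][j-1]; exact for i, j ∈ comunas (indices 0..14, always in range, Python never raises)
def cob (i j : Int) : Int := PySem.List.pyGetD (PySem.List.pyGetD cobertura (i - 1) []) (j - 1) 0

-- inner 'for i in comunas: … break' loop over the flag cubierta
def esfInner (solucion : List (Int × Int)) (j : Int) : Bool :=
  comunas.foldl
    (fun cubierta i =>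
      if cubierta then cubierta
      else cob i j == 1 && (PySem.Dict.mk solucion).getD i 0 == 1)
    false

-- outer 'for j in comunas' loop with early 'return False'
def esfOuter (solucion : List (Int × Int)) : List Int → Bool
  | [] => true
  | j :: rest => if !(esfInner solucion j) then false else esfOuter solucion rest

def es_factible (solucion : List (Int × Int)) : Bool := esfOuter solucion comunas

-- ===== PORT B =====
-- _masks of Source B: facility i's coverage row as a 15-bit mask (bit j-1 set iff cobertura[i-1][j-1]==1)
def masks : List Nat :=
  [4111, 18443, 4157, 2079, 2556, 308, 28368, 976, 1968, 1984, 10048, 18522, 4101, 25664, 26690]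

-- _masks[i-1]; exact for i ∈ 1..15 (index always in range)
def maskAt (i : Int) : Nat := PySem.List.pyGetD masks (i - 1) 0

def es_factible_alt (solucion : List (Int × Int)) : Bool :=
  ((PySem.List.pyRange 1 16 1).foldl
      (fun covered i =>
        if (PySem.Dict.mk solucion).getD i 0 == 1 then covered ||| maskAt i else covered)
      0) == 32767

-- ===== PRECONDITION & SPEC =====
def Spec_es_factible (solucion : List (Int × Int)) (out : Bool) : Prop := out = es_factible_alt solucion
instance (solucion : List (Int × Int)) (out : Bool) : Decidable (Spec_es_factible solucion out) := by unfold Spec_es_factible; infer_instance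

-- ===== CLAIM (what is proved, stated in full; the proofs are below) =====
def Claim_equal_es_factible : Prop := ∀ (solucion : List (Int × Int)), Dom_es_factible solucion → Spec_es_factible solucion (es_factible solucion)

-- ===== LEMMAS AND PROOFS =====

-- A's break-flag fold is List.any
theorem foldl_break_any (l : List Int) (p : Int → Bool) (b : Bool) :
    l.foldl (fun cub i => if cub then cub else p i) b = (b || l.any p) := by
  induction l generalizing b with
  | nil => simp
  | cons x xs ih => simp only [List.foldl_cons, List.any_cons]; cases b <;> cases h : p x <;> simp [ih]

-- A's early-return outer loop is List.all
theorem esfOuter_eq_all (solucion : List (Int × Int)) (l : List Int) :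
    esfOuter solucion l = l.all (fun j => esfInner solucion j) := by
  induction l with
  | nil => rfl
  | cons j rest ih =>
    simp only [esfOuter, List.all_cons, ih]
    cases h : esfInner solucion j <;> simp

-- a bit of B's mask accumulator, as a search over the selected facilities
theorem testBit_selFold (l : List Int) (s : Int → Bool) (m : Int → Nat) (c0 : Nat) (j : Nat) :
    (l.foldl (fun c i => if s i then c ||| m i else c) c0).testBit j
      = (c0.testBit j || l.any (fun i => s i && (m i).testBit j)) := by
  induction l generalizing c0 with
  | nil => simp
  | cons x xs ih =>
    simp only [List.foldl_cons, List.any_cons]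
    cases h : s x <;> simp [ih, Nat.testBit_or, Bool.or_assoc]

theorem maskAt_lt (i : Int) : maskAt i < 32768 := by
  unfold maskAt
  by_cases h : PySem.Raise.InRange masks.length (i - 1)
  · have hall : ∀ x ∈ masks, x < 32768 := by decide
    exact hall _ (PySem.List.pyGetD_mem (xs := masks) (i := i - 1) (d := 0) h)
  · rw [PySem.List.pyGetD_of_none]
    · norm_num
    · simp [PySem.List.pyGet?_eq_none_iff, h]

theorem selFold_lt (l : List Int) (s : Int → Bool) (c0 : Nat) (h0 : c0 < 32768) :
    (l.foldl (fun c i => if s i then c ||| maskAt i else c) c0) < 32768 := by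
  induction l generalizing c0 with
  | nil => exact h0
  | cons x xs ih =>
    simp only [List.foldl_cons]
    split
    · refine ih _ ?_
      have hm := maskAt_lt x
      have h2 : (32768 : Nat) = 2 ^ 15 := by norm_num
      rw [h2] at h0 hm ⊢
      exact Nat.or_lt_two_pow h0 hm
    · exact ih _ h0

-- the bridge between B's mask bits and A's matrix entries, checked by computation
theorem mask_bit_eq_cob :
    ∀ i ∈ comunas, ∀ jb ∈ List.range 15, (maskAt i).testBit jb = (cob i ((jb : Int) + 1) == 1) := by
  decide


-- ===== VERDICT (by name: the statement is the Claim_ definition above) =====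
theorem bit32767_lo : ∀ jb : Nat, jb ∈ List.range 15 → (32767 : Nat).testBit jb = true := by decide

theorem bit32767_hi (jb : Nat) (h : 15 ≤ jb) : (32767 : Nat).testBit jb = false :=
  Nat.testBit_eq_false_of_lt (lt_of_lt_of_le (by norm_num) (Nat.pow_le_pow_right (by norm_num) h))

theorem comunas_sub : ∀ j ∈ comunas, ∃ jb, jb ∈ List.range 15 ∧ ((jb : Int) + 1) = j := by decide

theorem mem_comunas : ∀ jb ∈ List.range 15, ((jb : Int) + 1) ∈ comunas := by decide

-- ===== VERDICT (by name: the statement is the Claim_ definition above) =====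
theorem es_factible_spec : Claim_equal_es_factible := by
  intro solucion _
  unfold Spec_es_factible es_factible es_factible_alt
  rw [esfOuter_eq_all, Bool.eq_iff_iff]
  rw [List.all_eq_true, beq_iff_eq]
  have hInner : ∀ j, esfInner solucion j
      = comunas.any (fun i => cob i j == 1 && ((PySem.Dict.mk solucion).getD i 0 == 1)) := by
    intro j; rw [esfInner, foldl_break_any, Bool.false_or]
  have hbit : ∀ jb : Nat,
      ((PySem.List.pyRange 1 16 1).foldl
        (fun covered i =>
          if (PySem.Dict.mk solucion).getD i 0 == 1 then covered ||| maskAt i else covered)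
        0).testBit jb
      = comunas.any (fun i => ((PySem.Dict.mk solucion).getD i 0 == 1) && (maskAt i).testBit jb) := by
    intro jb
    rw [show (PySem.List.pyRange 1 16 1) = comunas from rfl, testBit_selFold, Nat.zero_testBit,
      Bool.false_or]
  have hpt : ∀ jb ∈ List.range 15,
      esfInner solucion ((jb : Int) + 1)
        = comunas.any (fun i => ((PySem.Dict.mk solucion).getD i 0 == 1) && (maskAt i).testBit jb) := by
    intro jb hjb
    rw [hInner, Bool.eq_iff_iff, List.any_eq_true, List.any_eq_true]
    constructor
    · rintro ⟨i, hi, hc⟩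
      refine ⟨i, hi, ?_⟩
      rw [mask_bit_eq_cob i hi jb hjb, Bool.and_comm]; exact hc
    · rintro ⟨i, hi, hc⟩
      refine ⟨i, hi, ?_⟩
      rw [mask_bit_eq_cob i hi jb hjb, Bool.and_comm] at hc; exact hc
  constructor
  · intro hA
    apply Nat.eq_of_testBit_eq
    intro jb
    by_cases hjb : jb < 15
    · rw [hbit, bit32767_lo jb (List.mem_range.mpr hjb), ← hpt jb (List.mem_range.mpr hjb)]
      exact hA _ (mem_comunas jb (List.mem_range.mpr hjb))
    · rw [bit32767_hi jb (le_of_not_gt hjb)]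
      have h1 : (32768 : Nat) ≤ 2 ^ jb :=
        calc (32768 : Nat) = 2 ^ 15 := by norm_num
        _ ≤ 2 ^ jb := Nat.pow_le_pow_right (by norm_num) (le_of_not_gt hjb)
      exact Nat.testBit_eq_false_of_lt (lt_of_lt_of_le (selFold_lt _ _ 0 (by norm_num)) h1)
  · intro hB j hj
    obtain ⟨jb, hjb, hji⟩ := comunas_sub j hj
    subst hji
    rw [hpt jb hjb, ← hbit jb, hB]
    exact bit32767_lo jb hjb
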